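-- pv_equiv track=rewrite | github.com/Sekhara17/Basic-Programs | Accenture Basic  programs.py | diff_sum
-- ===== SOURCE A (Python) =====
-- def diff_sum(n,m):
--     n_div_sum1 = 0
--     n_not_div_sum2 = 0
--     for i in range(1,m+1):
--         if i % n == 0:
--             n_div_sum1 += i
--         else:
--             n_not_div_sum2 += i
--     return abs(n_div_sum1 - n_not_div_sum2)
-- ===== SOURCE B (Python) =====
-- def diff_sum(n, m):
--     if m < 1:
--         return 0
--     a = abs(n)
--     k = m // a
--     div = a * k * (k + 1) // 2
--     total = m * (m + 1) // 2
--     return abs(total - 2 * div)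
-- ===== Notes on version B (the rewrite author's own statement) =====
-- stated objective: faster
-- what changed: Replaces the O(m) loop over 1..m with closed-form Gauss sums: total = m(m+1)/2 and the divisible part |n|*k*(k+1)/2 with k = m//|n|, returning |total - 2*div| in O(1).
import Mathlib
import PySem

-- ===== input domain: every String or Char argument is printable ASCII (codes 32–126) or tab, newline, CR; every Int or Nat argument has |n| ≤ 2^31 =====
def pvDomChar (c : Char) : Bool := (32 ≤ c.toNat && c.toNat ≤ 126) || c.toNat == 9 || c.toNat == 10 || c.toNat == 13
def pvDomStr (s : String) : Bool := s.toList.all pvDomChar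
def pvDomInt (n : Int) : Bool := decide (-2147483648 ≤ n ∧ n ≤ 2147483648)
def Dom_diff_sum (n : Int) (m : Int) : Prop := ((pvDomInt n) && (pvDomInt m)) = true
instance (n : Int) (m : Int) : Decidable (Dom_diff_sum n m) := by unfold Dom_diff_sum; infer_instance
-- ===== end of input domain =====

-- B replaces A's O(m) loop with closed-form Gauss sums (O(1)); proved equal wherever A returns (n ≠ 0 or m < 1).


-- ===== PORT A =====
-- the loop body: accumulate into (n_div_sum1, n_not_div_sum2)
def diffSumStep (n : Int) (st : Int × Int) (i : Int) : Int × Int :=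
  if PySem.Int.mod i n = 0 then (st.1 + i, st.2) else (st.1, st.2 + i)

def diff_sum (n : Int) (m : Int) : Int :=
  let s := (PySem.List.pyRange 1 (m + 1) 1).foldl (diffSumStep n) (0, 0)
  |s.1 - s.2|

-- ===== PORT B =====
def diff_sum_alt (n : Int) (m : Int) : Int :=
  if m < 1 then 0
  else
    let a := |n|
    let k := PySem.Int.floordiv m a
    let div := PySem.Int.floordiv (a * k * (k + 1)) 2
    let total := PySem.Int.floordiv (m * (m + 1)) 2
    |total - 2 * div|

-- ===== PRECONDITION & SPEC =====
-- Pre_ excludes exactly n = 0 with m ≥ 1, where Python A raises ZeroDivisionError (i % 0).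
def Pre_diff_sum (n : Int) (m : Int) : Prop := n ≠ 0 ∨ m < 1
instance (n : Int) (m : Int) : Decidable (Pre_diff_sum n m) := by unfold Pre_diff_sum; infer_instance
def pvWitness_diff_sum : Int × Int := (3, 10)

def Spec_diff_sum (n : Int) (m : Int) (out : Int) : Prop := out = diff_sum_alt n m
instance (n : Int) (m : Int) (out : Int) : Decidable (Spec_diff_sum n m out) := by unfold Spec_diff_sum; infer_instance

-- ===== CLAIM (what is proved, stated in full; the proofs are below) =====
def Claim_equal_diff_sum : Prop := ∀ (n : Int) (m : Int), Dom_diff_sum n m → Pre_diff_sum n m → Spec_diff_sum n m (diff_sum n m)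

-- ===== LEMMAS AND PROOFS =====

-- floor division steps by one exactly when the divisor divides the successor
lemma succ_floordiv (a x : Int) (ha : 0 < a) :
    PySem.Int.floordiv (x + 1) a =
      PySem.Int.floordiv x a + (if a ∣ (x + 1) then 1 else 0) := by
  have h1 := PySem.Int.floordiv_mul_add_mod x a
  have h2 := PySem.Int.mod_nonneg x ha
  have h3 := PySem.Int.mod_lt x ha
  have e : (PySem.Int.floordiv x a + 1) * a = PySem.Int.floordiv x a * a + a := by ring
  have e2 : (PySem.Int.floordiv x a + 1 + 1) * a = PySem.Int.floordiv x a * a + a + a := by ring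
  split_ifs with hd
  · -- a divides x+1, so mod x a + 1 = a and x+1 = (floordiv x a + 1)*a
    have hdr : a ∣ (PySem.Int.mod x a + 1) := by
      have : PySem.Int.mod x a + 1 = (x + 1) - PySem.Int.floordiv x a * a := by linarith
      rw [this]
      exact dvd_sub hd (dvd_mul_left a _)
    have hle : a ≤ PySem.Int.mod x a + 1 := Int.le_of_dvd (by linarith) hdr
    rw [PySem.Int.floordiv_eq_iff_of_pos ha]
    constructor
    · linarith [e]
    · linarith [e2]
  · have hne : PySem.Int.mod x a + 1 ≠ a := by
      intro h
      exact hd ⟨PySem.Int.floordiv x a + 1, by linarith [e]⟩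
    have hlt : PySem.Int.mod x a + 1 < a := lt_of_le_of_ne (by linarith) hne
    rw [PySem.Int.floordiv_eq_iff_of_pos ha]
    have e3 : (PySem.Int.floordiv x a + 0) * a = PySem.Int.floordiv x a * a := by ring
    have e4 : (PySem.Int.floordiv x a + 0 + 1) * a = PySem.Int.floordiv x a * a + a := by ring
    constructor
    · linarith [e3]
    · linarith [e4]

-- loop invariant: after processing 1..j, the pair is characterised by k = j // |n|
lemma fold_invariant (n : Int) (hn : n ≠ 0) (j : Nat) :
    2 * ((PySem.List.pyRange 1 ((j : Int) + 1) 1).foldl (diffSumStep n) (0, 0)).1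
      = |n| * PySem.Int.floordiv (j : Int) |n| * (PySem.Int.floordiv (j : Int) |n| + 1) ∧
    2 * (((PySem.List.pyRange 1 ((j : Int) + 1) 1).foldl (diffSumStep n) (0, 0)).1
        + ((PySem.List.pyRange 1 ((j : Int) + 1) 1).foldl (diffSumStep n) (0, 0)).2)
      = (j : Int) * ((j : Int) + 1) := by
  have ha : 0 < |n| := abs_pos.mpr hn
  induction j with
  | zero =>
    rw [PySem.List.pyRange_one_eq_nil (by norm_num)]
    have h0 : PySem.Int.floordiv 0 |n| = 0 := by
      rw [PySem.Int.floordiv_eq_iff_of_pos ha]; constructor <;> simp [ha]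
    simp [h0]
  | succ j ih =>
    obtain ⟨ih1, ih2⟩ := ih
    have hsplit : PySem.List.pyRange 1 ((j : Int) + 1 + 1) 1
        = PySem.List.pyRange 1 ((j : Int) + 1) 1 ++ [(j : Int) + 1] := by
      rw [PySem.List.pyRange_one_succ_right (by omega)]
    have hk := succ_floordiv |n| (j : Int) ha
    have hmod : (PySem.Int.mod ((j : Int) + 1) n = 0) ↔ (|n| ∣ ((j : Int) + 1)) := by
      rw [PySem.Int.mod_eq_zero_iff_dvd, abs_dvd]
    push_cast
    rw [hsplit, List.foldl_append]
    set s := (PySem.List.pyRange 1 ((j : Int) + 1) 1).foldl (diffSumStep n) (0, 0) with hs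
    by_cases hd : |n| ∣ ((j : Int) + 1)
    · have hmz : PySem.Int.mod ((j : Int) + 1) |n| = 0 :=
        (PySem.Int.mod_eq_zero_iff_dvd _ _).mpr hd
      have hj1 : ((j : Int) + 1) = (PySem.Int.floordiv ((j : Int) + 1) |n|) * |n| := by
        have := PySem.Int.floordiv_mul_add_mod ((j : Int) + 1) |n|
        linarith [hmz]
      simp only [diffSumStep, List.foldl_cons, List.foldl_nil]
      rw [if_pos (hmod.mpr hd)]
      rw [if_pos hd] at hk
      rw [hk] at hj1
      constructor
      · simp only [hk]; linear_combination ih1 + 2 * hj1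
      · linear_combination ih2
    · simp only [diffSumStep, List.foldl_cons, List.foldl_nil]
      rw [if_neg (by rw [hmod]; exact hd)]
      rw [if_neg hd] at hk
      simp only [add_zero] at hk
      rw [hk]
      exact ⟨by linear_combination ih1, by linear_combination ih2⟩

-- floordiv by 2 of a doubled value
lemma floordiv_two_of_double (x y : Int) (h : 2 * y = x) : PySem.Int.floordiv x 2 = y := by
  rw [PySem.Int.floordiv_eq_iff_of_pos (by norm_num : (0:Int) < 2)]
  omega

-- ===== VERDICT (by name: the statement is the Claim_ definition above) =====
theorem diff_sum_spec : Claim_equal_diff_sum := by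
  intro n m _ hpre
  unfold Spec_diff_sum
  by_cases hm : m < 1
  · have hA : diff_sum n m = 0 := by
      unfold diff_sum
      rw [PySem.List.pyRange_one_eq_nil (by omega)]
      simp
    have hB : diff_sum_alt n m = 0 := by
      unfold diff_sum_alt
      rw [if_pos hm]
    rw [hA, hB]
  · have hn : n ≠ 0 := hpre.resolve_right hm
    obtain ⟨j, hj⟩ : ∃ j : Nat, m = (j : Int) := ⟨m.toNat, by omega⟩
    subst hj
    obtain ⟨h1, h2⟩ := fold_invariant n hn j
    set s := (PySem.List.pyRange 1 ((j : Int) + 1) 1).foldl (diffSumStep n) (0, 0) with hs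
    have hA : diff_sum n (j : Int) = |s.1 - s.2| := rfl
    have hB : diff_sum_alt n (j : Int) = |(s.1 + s.2) - 2 * s.1| := by
      unfold diff_sum_alt
      rw [if_neg hm]
      show |PySem.Int.floordiv ((j : Int) * ((j : Int) + 1)) 2 -
            2 * PySem.Int.floordiv (|n| * PySem.Int.floordiv (j : Int) |n| *
              (PySem.Int.floordiv (j : Int) |n| + 1)) 2| = _
      rw [floordiv_two_of_double _ _ h1, floordiv_two_of_double _ _ h2]
    rw [hA, hB]
    have h3 : (s.1 + s.2) - 2 * s.1 = -(s.1 - s.2) := by ring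
    rw [h3, abs_neg]
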